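-- pv_equiv track=rewrite | github.com/Patel-Hetu/Python_Ques | c2_W23.py | zero_sum
-- ===== SOURCE A (Python) =====
-- def zero_sum(nums) :
--     '''Assumes that nums is a tuple of integers.
--     Returns True if two integers in the tuple add up to 0, otherwise False.
--     '''
--
--     n=nums
--     #c=0
--     for i in nums:
--         for j in n:
--             if i!=j:
--                 if i+j==0:
--                     return True
--
--     return False
-- ===== SOURCE B (Python) =====
-- def zero_sum(nums):
--     '''Assumes that nums is a tuple of integers.
--     Returns True if two integers in the tuple add up to 0, otherwise False.
--     '''
--     s = set(nums)
--     return any(x != 0 and -x in s for x in s)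
-- ===== Notes on version B (the rewrite author's own statement) =====
-- stated objective: faster
-- what changed: Replaced the quadratic nested scan over all pairs by a hash set built once, answering True iff some nonzero x has -x in the set.
import Mathlib
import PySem

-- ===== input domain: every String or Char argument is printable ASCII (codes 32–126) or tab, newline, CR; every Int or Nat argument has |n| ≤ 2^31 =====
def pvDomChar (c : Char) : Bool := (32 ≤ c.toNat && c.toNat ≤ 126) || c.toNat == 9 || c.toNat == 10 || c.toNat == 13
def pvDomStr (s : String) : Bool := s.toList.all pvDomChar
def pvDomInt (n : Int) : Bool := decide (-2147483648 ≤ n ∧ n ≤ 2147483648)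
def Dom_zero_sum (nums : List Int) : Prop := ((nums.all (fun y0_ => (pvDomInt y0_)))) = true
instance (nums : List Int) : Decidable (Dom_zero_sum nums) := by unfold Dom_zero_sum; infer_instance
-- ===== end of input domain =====

-- B replaces A's quadratic nested scan with a set built once and a single membership scan (asymptotically faster).
-- ===== PORT A =====
-- for i in nums: for j in nums: if i != j: if i + j == 0: return True; return False
def zero_sum (nums : List Int) : Bool :=
  nums.any (fun i => nums.any (fun j => if i ≠ j then (if i + j = 0 then true else false) else false))

-- ===== PORT B =====
-- s = set(nums); return any(x != 0 and -x in s for x in s)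
def zero_sum_alt (nums : List Int) : Bool :=
  let s := PySem.Set.ofList nums
  s.any (fun x => x ≠ 0 && PySem.Set.contains s (-x))

-- ===== PRECONDITION & SPEC =====
def Spec_zero_sum (nums : List Int) (out : Bool) : Prop := out = zero_sum_alt nums
instance (nums : List Int) (out : Bool) : Decidable (Spec_zero_sum nums out) := by unfold Spec_zero_sum; infer_instance

-- ===== CLAIM (what is proved, stated in full; the proofs are below) =====
def Claim_equal_zero_sum : Prop := ∀ (nums : List Int), Dom_zero_sum nums → Spec_zero_sum nums (zero_sum nums)

-- ===== LEMMAS AND PROOFS =====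

-- ===== VERDICT (by name: the statement is the Claim_ definition above) =====
theorem zero_sum_key (nums : List Int) :
    zero_sum nums = zero_sum_alt nums := by
  rw [Bool.eq_iff_iff]
  simp only [zero_sum, zero_sum_alt, PySem.Set.contains, List.any_eq_true, List.contains_eq_mem,
    PySem.Set.mem_ofList, Bool.and_eq_true, decide_eq_true_eq]
  constructor
  · rintro ⟨i, hi, j, hj, h⟩
    split_ifs at h with h1 h2
    exact ⟨i, hi, by omega, by rw [show -i = j by omega]; exact hj⟩
  · rintro ⟨x, hx, hx0, hnx⟩
    refine ⟨x, hx, -x, hnx, ?_⟩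
    rw [if_pos (by omega), if_pos (by omega)]

theorem zero_sum_spec : Claim_equal_zero_sum := by
  intro nums _
  unfold Spec_zero_sum
  exact zero_sum_key nums
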